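-- pv_equiv track=rewrite | github.com/yiluyucheng/MethylationCohort | cohort/views.py | density_count
-- ===== SOURCE A (Python) =====
-- from collections import Counter
--
-- def density_count(d_list, bin=5):
--     ## calculate counts in each interval
--     d_list = [int(i // bin) for i in d_list]
--     dkeys = [i for i in range(min(d_list + [0]), max(d_list + [19]) + 1)]
--     d_all = dict(zip(dkeys, [0]*len(dkeys)))
--     d_all.update(Counter(d_list))
--     dx = [bin * i for i in list(d_all.keys())]
--     dy = list(d_all.values())
--     return dx, dy
-- ===== SOURCE B (Python) =====
-- def density_count(d_list, bin=5):
--     ## sort the binned values once, then sweep the key range with a single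
--     ## pointer over the sorted list, emitting each run length as that
--     ## interval's count (sort-then-scan instead of dict + Counter merge)
--     b = [v // bin for v in d_list]
--     lo = min(b + [0])
--     hi = max(b + [19])
--     s = sorted(b)
--     n = len(s)
--     dx, dy, j = [], [], 0
--     for k in range(lo, hi + 1):
--         start = j
--         while j < n and s[j] == k:
--             j += 1
--         dx.append(bin * k)
--         dy.append(j - start)
--     return dx, dy
-- ===== Notes on version B (the rewrite author's own statement) =====
-- stated objective: alternative
-- what changed: B sorts the binned values once and sweeps the key range with a single pointer over the sorted list, emitting each run length as the interval's count, instead of zero-filling a dict from zip(range,zeros) and merging a collections.Counter into it.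
import Mathlib
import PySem

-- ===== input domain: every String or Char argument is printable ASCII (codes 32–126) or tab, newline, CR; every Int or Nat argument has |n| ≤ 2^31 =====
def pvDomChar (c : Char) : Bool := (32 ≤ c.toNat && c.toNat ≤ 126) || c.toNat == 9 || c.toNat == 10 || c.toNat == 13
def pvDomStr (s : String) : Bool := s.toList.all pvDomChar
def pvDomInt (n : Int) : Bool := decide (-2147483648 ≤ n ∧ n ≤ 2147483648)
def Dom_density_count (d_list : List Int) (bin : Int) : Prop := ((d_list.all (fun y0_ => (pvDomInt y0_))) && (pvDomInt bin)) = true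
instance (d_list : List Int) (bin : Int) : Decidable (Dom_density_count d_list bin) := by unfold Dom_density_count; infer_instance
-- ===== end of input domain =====

-- B replaces A's zero-filled dict merged with a Counter by a sort-then-scan: sort the binned
-- values once and sweep the key range with one pointer, emitting run lengths (objective: alternative).

-- ===== PORT A =====
-- min/max of a nonempty list: min?/max? is `some` here (the list contains the padding element), so `.getD 0` never fires
def density_count (d_list : List Int) (bin : Int) : List Int × List Int :=
  let dl := d_list.map (fun i => PySem.Int.floordiv i bin)
  let dkeys := PySem.List.pyRange ((PySem.List.min? (dl ++ [0]) (fun x => x)).getD 0)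
      (((PySem.List.max? (dl ++ [19]) (fun x => x)).getD 0) + 1) 1
  let d_all := PySem.Dict.ofList (dkeys.zip (List.replicate dkeys.length (0 : Int)))
  let d_all2 := d_all.update (PySem.Dict.counter dl).items
  let dx := d_all2.keys.map (fun i => bin * i)
  let dy := d_all2.values
  (dx, dy)

-- ===== PORT B =====
-- the inner `while j < n and s[j] == k: j += 1` loop of Source B
def bAdvance (s : List Int) (k : Int) (j : Nat) : Nat :=
  if h : j < s.length then
    if s[j] = k then bAdvance s k (j + 1) else j
  else j
termination_by s.length - j

def density_count_alt (d_list : List Int) (bin : Int) : List Int × List Int :=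
  let b := d_list.map (fun v => PySem.Int.floordiv v bin)
  let lo := (PySem.List.min? (b ++ [0]) (fun x => x)).getD 0
  let hi := (PySem.List.max? (b ++ [19]) (fun x => x)).getD 0
  let s := PySem.List.sorted b (fun x => x) false
  let res := (PySem.List.pyRange lo (hi + 1) 1).foldl
    (fun (st : List Int × List Int × Nat) k =>
      let j := bAdvance s k st.2.2
      (st.1 ++ [bin * k], st.2.1 ++ [(j : Int) - (st.2.2 : Int)], j))
    ([], [], 0)
  (res.1, res.2.1)

-- ===== PRECONDITION & SPEC =====
-- Pre_ excludes bin = 0 with a nonempty d_list, exactly where Python's `i // bin` raises ZeroDivisionError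
-- (on an empty d_list no division is executed, so that input stays inside).
def Pre_density_count (d_list : List Int) (bin : Int) : Prop := d_list = [] ∨ bin ≠ 0
instance (d_list : List Int) (bin : Int) : Decidable (Pre_density_count d_list bin) := by unfold Pre_density_count; infer_instance
def pvWitness_density_count : List Int × Int := ([7, -3, 101], 5)

def Spec_density_count (d_list : List Int) (bin : Int) (out : List Int × List Int) : Prop := out = density_count_alt d_list bin
instance (d_list : List Int) (bin : Int) (out : List Int × List Int) : Decidable (Spec_density_count d_list bin out) := by unfold Spec_density_count; infer_instance

-- ===== CLAIM (what is proved, stated in full; the proofs are below) =====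
def Claim_equal_density_count : Prop := ∀ (d_list : List Int) (bin : Int), Dom_density_count d_list bin → Pre_density_count d_list bin → Spec_density_count d_list bin (density_count d_list bin)

-- ===== LEMMAS AND PROOFS =====

-- ---- B side: the pointer sweep over the sorted list ----

-- the while loop advances exactly over the leading run of k's of the current suffix
theorem bAdvance_eq (s : List Int) (k : Int) :
    ∀ (t : List Int) (j : Nat), s.drop j = t →
      bAdvance s k j = j + (t.takeWhile (fun x => x == k)).length := by
  intro t
  induction t with
  | nil =>
    intro j hd
    have hj : s.length ≤ j := List.drop_eq_nil_iff.mp hd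
    unfold bAdvance
    simp [Nat.not_lt.mpr hj]
  | cons x t ih =>
    intro j hd
    have hjlen : j < s.length := by
      have := congrArg List.length hd
      simp [List.length_drop] at this
      omega
    have hx : s[j] = x := by
      have h0 : (s.drop j)[0]'(by simp [hd]) = x := by simp [hd]
      rw [List.getElem_drop] at h0
      simpa using h0
    have hd' : s.drop (j + 1) = t := by
      have : s.drop (j + 1) = (s.drop j).drop 1 := by
        rw [List.drop_drop, Nat.add_comm]
      rw [this, hd, List.drop_one, List.tail_cons]
    unfold bAdvance
    by_cases hxk : x = k
    · rw [dif_pos hjlen, if_pos (hx.trans hxk), ih (j + 1) hd']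
      simp [hxk]
      omega
    · rw [dif_pos hjlen, if_neg (by rw [hx]; exact hxk)]
      simp [hxk]

-- in a sorted suffix whose elements are all ≥ k, the leading run of k's is exactly the
-- multiplicity of k, it is a block of k's, and what remains is all ≥ k + 1
theorem sorted_run (k : Int) :
    ∀ (t : List Int), t.Pairwise (· ≤ ·) → (∀ x ∈ t, k ≤ x) →
      (t.takeWhile (fun x => x == k)).length = t.count k ∧
      t.take (t.count k) = List.replicate (t.count k) k ∧
      (∀ x ∈ t.drop (t.count k), k + 1 ≤ x) := by
  intro t
  induction t with
  | nil => intro _ _; simp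
  | cons x t ih =>
    intro hp hk
    have hle : ∀ y ∈ t, x ≤ y := (List.pairwise_cons.mp hp).1
    have hpt : t.Pairwise (· ≤ ·) := (List.pairwise_cons.mp hp).2
    have hkx : k ≤ x := hk x (by simp)
    by_cases hxk : x = k
    · subst hxk
      obtain ⟨h1, h2, h3⟩ := ih hpt (fun y hy => hle y hy)
      refine ⟨?_, ?_, ?_⟩
      · simp [h1]
      · simp [List.take_succ_cons, List.replicate_succ, h2]
      · intro y hy
        rw [List.count_cons_self, List.drop_succ_cons] at hy
        exact h3 y hy
    · have hkltx : k + 1 ≤ x := by omega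
      have hcnt0 : t.count k = 0 := by
        rw [List.count_eq_zero]
        intro hmem
        have := hle k hmem
        omega
      have hcnt : (x :: t).count k = 0 := by
        rw [List.count_cons, hcnt0]
        simp [hxk]
      refine ⟨?_, by simp [hcnt], ?_⟩
      · simp [hxk, hcnt]
      · rw [hcnt, List.drop_zero]
        intro y hy
        rcases List.mem_cons.mp hy with h | h
        · omega
        · have := hle y h; omega

-- the key sweep: starting from a pointer whose suffix is all ≥ a, the fold appends
-- bin*k to dx and the multiplicity of k (in the current suffix) to dy, key by key
theorem loopB (s : List Int) (hs : s.Pairwise (· ≤ ·)) (bin : Int) :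
    ∀ (m : Nat) (a : Int) (j : Nat) (dx dy : List Int),
      (∀ x ∈ s.drop j, a ≤ x) →
      ∃ j', (PySem.List.pyRange a (a + m) 1).foldl
          (fun (st : List Int × List Int × Nat) k =>
            (st.1 ++ [bin * k], st.2.1 ++ [((bAdvance s k st.2.2 : Nat) : Int) - (st.2.2 : Int)],
             bAdvance s k st.2.2))
          (dx, dy, j)
        = (dx ++ (PySem.List.pyRange a (a + m) 1).map (fun k => bin * k),
           dy ++ (PySem.List.pyRange a (a + m) 1).map (fun k => ((s.drop j).count k : Int)),
           j') := by
  intro m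
  induction m with
  | zero =>
    intro a j dx dy _
    refine ⟨j, ?_⟩
    simp
  | succ m ih =>
    intro a j dx dy hge
    have hcons : PySem.List.pyRange a (a + (m + 1)) 1 = a :: PySem.List.pyRange (a + 1) (a + (m + 1)) 1 :=
      PySem.List.pyRange_one_cons (by omega)
    -- effect of the advance at key a
    have hpt : (s.drop j).Pairwise (· ≤ ·) := hs.sublist (List.drop_sublist _ _)
    obtain ⟨h1, h2, h3⟩ := sorted_run a (s.drop j) hpt hge
    set c := (s.drop j).count a with hc
    have hadv : bAdvance s a j = j + c := by
      rw [bAdvance_eq s a (s.drop j) j rfl, h1]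
    have hdrop' : s.drop (j + c) = (s.drop j).drop c := by
      rw [List.drop_drop, Nat.add_comm]
    -- counts of later keys are unchanged by dropping the block of a's
    have hcount' : ∀ k' : Int, k' ≠ a → (s.drop (j + c)).count k' = (s.drop j).count k' := by
      intro k' hne
      conv_rhs => rw [← List.take_append_drop c (s.drop j)]
      rw [List.count_append, h2, List.count_replicate, hdrop']
      simp [Ne.symm hne]
    obtain ⟨j', hj'⟩ := ih (a + 1) (j + c) (dx ++ [bin * a]) (dy ++ [((j + c : Nat) : Int) - (j : Nat)])
      (by rw [hdrop']; exact h3)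
    refine ⟨j', ?_⟩
    push_cast at hj' ⊢
    rw [hcons, List.foldl_cons]
    simp only [hadv]
    push_cast
    rw [show a + ((m : Int) + 1) = (a + 1) + (m : Int) from by omega]
    rw [hj']
    have hmapc : (PySem.List.pyRange (a + 1) ((a + 1) + (m : Int)) 1).map
          (fun k => ((s.drop (j + c)).count k : Int))
        = (PySem.List.pyRange (a + 1) ((a + 1) + (m : Int)) 1).map
          (fun k => ((s.drop j).count k : Int)) :=
      List.map_congr_left fun k hk => by
        have hk1 : a + 1 ≤ k := (PySem.List.mem_pyRange_one.mp hk).1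
        rw [hcount' k (by omega)]
    rw [hmapc]
    simp only [List.map_cons, List.append_assoc, List.singleton_append]
    rw [Prod.mk.injEq, Prod.mk.injEq]
    refine ⟨rfl, ?_, rfl⟩
    congr 2
    rw [← hc]
    ring

-- ---- A side: the zero-filled dict merged with the Counter ----

-- a fold of inserts leaves keys it never touches alone
theorem getD_update_not_mem (ps : List (Int × Int)) (d : PySem.Dict Int Int) (k : Int)
    (h : k ∉ ps.map Prod.fst) :
    (ps.foldl (fun d p => d.insert p.1 p.2) d).getD k 0 = d.getD k 0 := by
  induction ps generalizing d with
  | nil => rfl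
  | cons p ps ih =>
    simp only [List.map_cons, List.mem_cons, not_or] at h
    rw [List.foldl_cons, ih _ h.2, PySem.Dict.getD_insert_of_ne _ _ _ h.1]

-- a fold of inserts with distinct keys sets each key to its paired value
theorem getD_update_mem (ps : List (Int × Int)) (d : PySem.Dict Int Int) (k v : Int)
    (hnd : (ps.map Prod.fst).Nodup) (hm : (k, v) ∈ ps) :
    (ps.foldl (fun d p => d.insert p.1 p.2) d).getD k 0 = v := by
  induction ps generalizing d with
  | nil => simp at hm
  | cons p ps ih =>
    simp only [List.map_cons, List.nodup_cons] at hnd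
    rcases List.mem_cons.mp hm with h | h
    · subst h
      rw [List.foldl_cons, getD_update_not_mem _ _ _ hnd.1, PySem.Dict.getD_insert_self]
    · exact ih _ hnd.2 h

-- updating a set with elements it already has changes nothing
theorem set_update_subset (xs : List Int) (s : PySem.Set Int) (h : ∀ x ∈ xs, x ∈ s) :
    PySem.Set.update s xs = s := by
  induction xs generalizing s with
  | nil => rfl
  | cons x xs ih =>
    have : PySem.Set.add s x = s := PySem.Set.add_of_mem (h x (by simp))
    simp only [PySem.Set.update, List.foldl_cons, this]
    exact ih s (fun y hy => h y (by simp [hy]))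

-- a dict with distinct keys is its key list paired with its lookups
theorem items_eq_keys_map (d : PySem.Dict Int Int) (h : d.keys.Nodup) :
    d.items = d.keys.map (fun k => (k, d.getD k 0)) := by
  have hk : d.keys = d.items.map Prod.fst := by simp only [PySem.Dict.keys]
  rw [hk, List.map_map]
  conv_lhs => rw [← List.map_id d.items]
  refine List.map_congr_left fun p hp => ?_
  have := PySem.Dict.getD_of_mem_items d (k := p.1) (v := p.2) (by simpa using hp) h 0
  simp [Function.comp, this]

-- every element of xs is paired with c in zip xs (replicate |xs| c)
theorem mem_zip_replicate (xs : List Int) (k c : Int) (h : k ∈ xs) :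
    (k, c) ∈ xs.zip (List.replicate xs.length c) := by
  induction xs with
  | nil => simp at h
  | cons x xs ih =>
    rcases List.mem_cons.mp h with h | h
    · subst h
      simp [List.replicate_succ]
    · simp only [List.length_cons, List.replicate_succ, List.zip_cons_cons, List.mem_cons]
      exact Or.inr (ih h)

-- ===== VERDICT (by name: the statement is the Claim_ definition above) =====
theorem density_count_spec : Claim_equal_density_count := by
  intro d_list bin _ _
  unfold Spec_density_count density_count density_count_alt
  simp only []
  set dl := d_list.map (fun i => PySem.Int.floordiv i bin) with hdl
  -- name lo and hi
  obtain ⟨lo, hlo⟩ : ∃ m, PySem.List.min? (dl ++ [0]) (fun x => x) = some m := by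
    cases h : PySem.List.min? (dl ++ [0]) (fun x => x) with
    | none => exact absurd ((PySem.List.min?_eq_none_iff _ _).mp h) (by simp)
    | some m => exact ⟨m, rfl⟩
  obtain ⟨hi, hhi⟩ : ∃ m, PySem.List.max? (dl ++ [19]) (fun x => x) = some m := by
    cases h : PySem.List.max? (dl ++ [19]) (fun x => x) with
    | none => exact absurd ((PySem.List.max?_eq_none_iff _ _).mp h) (by simp)
    | some m => exact ⟨m, rfl⟩
  rw [hlo, hhi]
  simp only [Option.getD_some]
  have hlo0 : lo ≤ 0 := PySem.List.min?_isMin hlo 0 (by simp)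
  have hhi19 : (19:Int) ≤ hi := PySem.List.max?_isMax hhi 19 (by simp)
  have hbound : ∀ v ∈ dl, lo ≤ v ∧ v ≤ hi := fun v hv =>
    ⟨PySem.List.min?_isMin hlo v (by simp [hv]), PySem.List.max?_isMax hhi v (by simp [hv])⟩
  -- name the common key range and the two dict stages of A
  set dkeys := PySem.List.pyRange lo (hi + 1) 1 with hdkeys
  set zs := dkeys.zip (List.replicate dkeys.length (0 : Int)) with hzs
  have hdknd : dkeys.Nodup := PySem.List.nodup_pyRange_one _ _
  have hlenz : dkeys.length ≤ (List.replicate dkeys.length (0 : Int)).length := by simp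
  have hzfst : zs.map Prod.fst = dkeys := List.map_fst_zip hlenz
  -- the zero-filled dict: items are exactly zs
  have hall : (PySem.Dict.ofList zs).items = zs := by
    show ((zs.foldl (fun d p => d.insert p.1 p.2) PySem.Dict.empty)).items = zs
    rw [PySem.Dict.items_foldl_insert_fresh zs Prod.fst Prod.snd PySem.Dict.empty
      (fun a _ => PySem.Dict.contains_empty _) (hzfst ▸ hdknd)]
    simp [PySem.Dict.empty]
  have hallkeys : (PySem.Dict.ofList zs).keys = dkeys := by
    simp only [PySem.Dict.keys, hall, hzfst]
  -- A's Counter, as an item list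
  set ps := (PySem.Dict.counter dl).items with hps
  have hpsfst : ps.map Prod.fst = PySem.Set.ofList dl := by
    rw [hps, PySem.Dict.items_counter, List.map_map]
    exact (List.map_congr_left fun k _ => rfl).trans (List.map_id _)
  have hpsnd : (ps.map Prod.fst).Nodup := hpsfst ▸ PySem.Set.nodup_ofList dl
  have hsub : ∀ x ∈ PySem.Set.ofList dl, x ∈ dkeys := by
    intro x hx
    obtain ⟨h1, h2⟩ := hbound x ((PySem.Set.mem_ofList _ _).mp hx)
    exact PySem.List.mem_pyRange_one.mpr ⟨h1, by omega⟩
  set f := PySem.Dict.update (PySem.Dict.ofList zs) ps with hf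
  -- merging the Counter in does not change A's key sequence
  have hfkeys : f.keys = dkeys := by
    rw [hf]
    show (List.foldl (fun (d : PySem.Dict Int Int) (p : Int × Int) => d.insert p.1 p.2)
      (PySem.Dict.ofList zs) ps).keys = dkeys
    rw [PySem.Dict.keys_foldl_insert_key ps Prod.fst (fun d p => p.2) _, hallkeys, hpsfst]
    exact set_update_subset _ _ hsub
  -- after the merge, every key holds its occurrence count
  have hfgetD : ∀ k ∈ dkeys, f.getD k 0 = (dl.count k : Int) := by
    intro k hk
    by_cases hkdl : k ∈ dl
    · have hm : (k, (dl.count k : Int)) ∈ ps := by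
        rw [hps, PySem.Dict.items_counter]
        exact List.mem_map.mpr ⟨k, (PySem.Set.mem_ofList _ _).mpr hkdl, rfl⟩
      exact getD_update_mem ps _ k _ hpsnd hm
    · have hnk : k ∉ ps.map Prod.fst := by
        rw [hpsfst]; simpa [PySem.Set.mem_ofList _ _] using hkdl
      rw [hf]
      show (List.foldl (fun (d : PySem.Dict Int Int) (p : Int × Int) => d.insert p.1 p.2)
        (PySem.Dict.ofList zs) ps).getD k 0 = _
      rw [getD_update_not_mem ps _ k hnk,
        PySem.Dict.getD_of_mem_items _ (by rw [hall]; exact mem_zip_replicate dkeys k 0 hk)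
          (by rw [hallkeys]; exact hdknd) 0]
      simp [List.count_eq_zero.mpr hkdl]
  have hfitems : f.items = dkeys.map (fun k => (k, (dl.count k : Int))) := by
    rw [items_eq_keys_map f (by rw [hfkeys]; exact hdknd), hfkeys]
    exact List.map_congr_left fun k hk => by rw [hfgetD k hk]
  -- B's sorted list and sweep
  set s := PySem.List.sorted dl (fun x => x) false with hsrt
  have hsp : s.Pairwise (· ≤ ·) := by
    have := PySem.List.sorted_pairwise dl (fun x => x)
    rwa [← hsrt] at this
  have hperm : s.Perm dl := PySem.List.sorted_perm dl (fun x => x) false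
  have hmem : ∀ x ∈ s, lo ≤ x := fun x hx => (hbound x (hperm.mem_iff.mp hx)).1
  have hm' : lo + ((hi + 1 - lo).toNat : Int) = hi + 1 := by omega
  obtain ⟨j', hloop⟩ := loopB s hsp bin (hi + 1 - lo).toNat lo 0 [] []
    (by simpa using hmem)
  rw [hm'] at hloop
  rw [← hdkeys] at hloop
  simp only [hloop]
  -- assemble the pair
  simp only [List.drop_zero, List.nil_append]
  rw [Prod.mk.injEq]
  constructor
  · rw [hfkeys]
  · show f.values = dkeys.map (fun k => ((s.count k : Nat) : Int))
    simp only [PySem.Dict.values, hfitems, List.map_map]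
    refine List.map_congr_left fun k _ => ?_
    simp [Function.comp, hperm.count_eq]
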